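-- pv_equiv track=rewrite | github.com/95ep/AoC | y2021/day24_new.py | get_model_no
-- ===== SOURCE A (Python) =====
-- def get_model_no(add_to_x, add_to_y, divide_z_by, part_1=True):
--     stack = []
--     model_no = [0 for _ in range(14)]
--     for i, (u, v, w) in enumerate(zip(add_to_x, add_to_y, divide_z_by)):
--         if w == 1:
--             stack.append((i, v))
--         else:
--             iv, v_tilde = stack.pop()
--             # relation between digits and params is:
--             # model_no[iv] + v_tilde + u == model_no[i]
--             param_sum = v_tilde + u
--             if part_1:
--                 model_no[iv] = min(9, 9 - param_sum)
--                 model_no[i] = model_no[iv] + param_sum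
--             else:
--                 model_no[iv] = max(1, 1 - param_sum)
--                 model_no[i] = model_no[iv] + param_sum
--
--     return "".join([str(digit) for digit in model_no])
-- ===== SOURCE B (Python) =====
-- def _partner(ws, i):
--     # index of the unmatched "push" (w == 1) that a pop at position i matches,
--     # found by a backward balance scan instead of a running stack
--     bal = 0
--     for j in range(i - 1, -1, -1):
--         if ws[j] == 1:
--             if bal == 0:
--                 return j
--             bal -= 1
--         else:
--             bal += 1
--     return None
--
--
-- def get_model_no(add_to_x, add_to_y, divide_z_by, part_1=True):
--     ws = [w for _, _, w in zip(add_to_x, add_to_y, divide_z_by)]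
--     model_no = [0] * 14
--     for i, (u, v, w) in enumerate(zip(add_to_x, add_to_y, divide_z_by)):
--         if w != 1:
--             iv = _partner(ws, i)
--             param_sum = add_to_y[iv] + u
--             d = min(9, 9 - param_sum) if part_1 else max(1, 1 - param_sum)
--             model_no[iv] = d
--             model_no[i] = d + param_sum
--     return "".join(str(digit) for digit in model_no)
-- ===== Notes on version B (the rewrite author's own statement) =====
-- stated objective: alternative
-- what changed: B removes A's running stack: for each pop position it finds the matching push index directly with a backward balance scan over the prefix of divide_z_by (parenthesis-matching by counting), then computes the two digits from that pair.
import Mathlib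
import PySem

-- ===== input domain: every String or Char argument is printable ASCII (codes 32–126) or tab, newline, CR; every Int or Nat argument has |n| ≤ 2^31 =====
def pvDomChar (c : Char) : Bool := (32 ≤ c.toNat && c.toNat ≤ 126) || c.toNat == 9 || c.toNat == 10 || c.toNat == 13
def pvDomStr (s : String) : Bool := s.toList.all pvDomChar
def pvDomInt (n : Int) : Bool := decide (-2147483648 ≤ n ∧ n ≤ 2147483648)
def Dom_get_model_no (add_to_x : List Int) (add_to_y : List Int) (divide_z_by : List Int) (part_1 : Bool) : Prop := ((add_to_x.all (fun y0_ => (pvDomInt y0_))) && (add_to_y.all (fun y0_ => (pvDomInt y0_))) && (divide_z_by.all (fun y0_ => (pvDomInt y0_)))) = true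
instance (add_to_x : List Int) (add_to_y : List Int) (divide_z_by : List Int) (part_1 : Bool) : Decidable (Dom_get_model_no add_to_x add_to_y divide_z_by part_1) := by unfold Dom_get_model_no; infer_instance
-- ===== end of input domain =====

-- B replaces A's running stack by a per-pop backward balance scan that finds each
-- pop's matching push index directly (alternative algorithm, not faster).

-- enumerate with Nat indices (Python enumerate; indices are always ≥ 0 here, exact)
def pvEnum {α : Type} (s : Nat) : List α → List (Nat × α)
  | [] => []
  | x :: xs => (s, x) :: pvEnum (s + 1) xs

-- ===== PORT A =====
def pvGoA (p1 : Bool) : List (Nat × (Int × Int × Int)) → List (Nat × Int) → List Int → List Int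
  | [], _, m => m
  | (i, (u, v, w)) :: rest, st, m =>
    if w == 1 then pvGoA p1 rest ((i, v) :: st) m
    else
      match st with
      | [] => pvGoA p1 rest [] m  -- Python: stack.pop() raises IndexError here; excluded by Pre_
      | (iv, vt) :: st' =>
        let ps := vt + u
        -- under Pre_ iv < i < 14, so model_no[iv] after the write reads back d (exact)
        let d := if p1 then min 9 (9 - ps) else max 1 (1 - ps)
        pvGoA p1 rest st' ((m.set iv d).set i (d + ps))

def get_model_no (add_to_x : List Int) (add_to_y : List Int) (divide_z_by : List Int) (part_1 : Bool) : String :=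
  let tz := add_to_x.zip (add_to_y.zip divide_z_by)
  let m := pvGoA part_1 (pvEnum 0 tz) [] (List.replicate 14 0)
  PySem.Str.join "" (m.map PySem.Int.toStr)

-- ===== PORT B =====
-- _partner's backward scan over the reversed enumerated prefix ws[:i]
def pvScanBack : List (Nat × Int) → Nat → Option Nat
  | [], _ => none
  | (j, w) :: rest, bal =>
    if w == 1 then (if bal == 0 then some j else pvScanBack rest (bal - 1))
    else pvScanBack rest (bal + 1)

def pvGoB (ys ws : List Int) (p1 : Bool) : List (Nat × (Int × Int × Int)) → List Int → List Int
  | [], m => m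
  | (i, (u, _v, w)) :: rest, m =>
    if w == 1 then pvGoB ys ws p1 rest m
    else
      match pvScanBack ((pvEnum 0 ws).take i).reverse 0 with
      | none => pvGoB ys ws p1 rest m  -- Python: add_to_y[None] raises TypeError; excluded by Pre_
      | some iv =>
        let ps := ys.getD iv 0 + u  -- iv < i ≤ len add_to_y, so getD = Python add_to_y[iv] (exact)
        let d := if p1 then min 9 (9 - ps) else max 1 (1 - ps)
        pvGoB ys ws p1 rest ((m.set iv d).set i (d + ps))

def get_model_no_alt (add_to_x : List Int) (add_to_y : List Int) (divide_z_by : List Int) (part_1 : Bool) : String :=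
  let tz := add_to_x.zip (add_to_y.zip divide_z_by)
  let ws := tz.map (fun t => t.2.2)
  let m := pvGoB add_to_y ws part_1 (pvEnum 0 tz) (List.replicate 14 0)
  PySem.Str.join "" (m.map PySem.Int.toStr)

-- ===== PRECONDITION & SPEC =====
-- Pre_ = exactly the inputs where Python A returns: every pop (w ≠ 1 in the zipped
-- region) finds a non-empty stack (more pushes than pops before it) and writes at
-- an index < 14 (model_no has fixed length 14; a pop at i ≥ 14 raises IndexError).
def Pre_get_model_no (add_to_x : List Int) (add_to_y : List Int) (divide_z_by : List Int) (part_1 : Bool) : Prop :=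
  ∀ i, i < min add_to_x.length (min add_to_y.length divide_z_by.length) →
    ¬ (divide_z_by.getD i 0 = 1) →
    i < 14 ∧ ((divide_z_by.take i).countP (fun w => w != 1)) < ((divide_z_by.take i).countP (fun w => w == 1))
instance (add_to_x : List Int) (add_to_y : List Int) (divide_z_by : List Int) (part_1 : Bool) : Decidable (Pre_get_model_no add_to_x add_to_y divide_z_by part_1) := by unfold Pre_get_model_no; infer_instance

def pvWitness_get_model_no : List Int × List Int × List Int × Bool := ([5, -3], [2, 4], [1, 26], true)

def Spec_get_model_no (add_to_x : List Int) (add_to_y : List Int) (divide_z_by : List Int) (part_1 : Bool) (out : String) : Prop := out = get_model_no_alt add_to_x add_to_y divide_z_by part_1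
instance (add_to_x : List Int) (add_to_y : List Int) (divide_z_by : List Int) (part_1 : Bool) (out : String) : Decidable (Spec_get_model_no add_to_x add_to_y divide_z_by part_1 out) := by unfold Spec_get_model_no; infer_instance

-- ===== CLAIM (what is proved, stated in full; the proofs are below) =====
def Claim_equal_get_model_no : Prop := ∀ (add_to_x : List Int) (add_to_y : List Int) (divide_z_by : List Int) (part_1 : Bool), Dom_get_model_no add_to_x add_to_y divide_z_by part_1 → Pre_get_model_no add_to_x add_to_y divide_z_by part_1 → Spec_get_model_no add_to_x add_to_y divide_z_by part_1 (get_model_no add_to_x add_to_y divide_z_by part_1)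

-- ===== LEMMAS AND PROOFS =====

theorem pvEnum_getElem? {α : Type} (s : Nat) (l : List α) (k : Nat) :
    (pvEnum s l)[k]? = l[k]?.map (fun x => (s + k, x)) := by
  induction l generalizing s k with
  | nil => simp [pvEnum]
  | cons x xs ih =>
    cases k with
    | zero => simp [pvEnum]
    | succ k => simp [pvEnum, ih (s + 1) k, Nat.add_assoc, Nat.add_comm 1 k]

theorem pvEnum_countP_eq (s : Nat) (l : List Int) :
    (pvEnum s l).countP (fun p : Nat × Int => p.2 == 1) = l.countP (fun w => w == 1) := by
  induction l generalizing s with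
  | nil => rfl
  | cons x xs ih => simp [pvEnum, List.countP_cons, ih (s + 1)]

theorem pvEnum_countP_ne (s : Nat) (l : List Int) :
    (pvEnum s l).countP (fun p : Nat × Int => p.2 != 1) = l.countP (fun w => w != 1) := by
  induction l generalizing s with
  | nil => rfl
  | cons x xs ih => simp [pvEnum, List.countP_cons, ih (s + 1)]

-- stack-from-scan abstraction: the b-th element (from the top) of A's stack
def pvSOS (ws : List Int) (k b : Nat) : Option Nat :=
  pvScanBack ((pvEnum 0 ws).take k).reverse b

theorem pvEnum_take_succ (ws : List Int) (k : Nat) (w : Int) (hk : ws[k]? = some w) :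
    (pvEnum 0 ws).take (k + 1) = (pvEnum 0 ws).take k ++ [(k, w)] := by
  rw [List.take_succ, pvEnum_getElem?, hk]
  simp

theorem pvSOS_open_zero (ws : List Int) (k : Nat) (w : Int) (hk : ws[k]? = some w)
    (hw : w = 1) : pvSOS ws (k + 1) 0 = some k := by
  simp [pvSOS, pvEnum_take_succ ws k w hk, pvScanBack, hw]

theorem pvSOS_open_succ (ws : List Int) (k : Nat) (w : Int) (hk : ws[k]? = some w)
    (hw : w = 1) (b : Nat) : pvSOS ws (k + 1) (b + 1) = pvSOS ws k b := by
  simp [pvSOS, pvEnum_take_succ ws k w hk, pvScanBack, hw]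

theorem pvSOS_close (ws : List Int) (k : Nat) (w : Int) (hk : ws[k]? = some w)
    (hw : ¬ w = 1) (b : Nat) : pvSOS ws (k + 1) b = pvSOS ws k (b + 1) := by
  simp [pvSOS, pvEnum_take_succ ws k w hk, pvScanBack, hw]

theorem pvScanBack_none_le (l : List (Nat × Int)) (b : Nat) (h : pvScanBack l b = none) :
    l.countP (fun p => p.2 == 1) ≤ l.countP (fun p => p.2 != 1) + b := by
  induction l generalizing b with
  | nil => simp
  | cons p rest ih =>
    obtain ⟨j, w⟩ := p
    by_cases hw : w = 1
    · have hb : ¬ b = 0 := by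
        intro h0; subst h0; simp [pvScanBack, hw] at h
      have h' : pvScanBack rest (b - 1) = none := by
        simpa [pvScanBack, hw, hb] using h
      have hih := ih (b - 1) h'
      have hc1 : ((j, w) :: rest).countP (fun p => p.2 == 1)
          = rest.countP (fun p => p.2 == 1) + 1 := by simp [List.countP_cons, hw]
      have hc2 : ((j, w) :: rest).countP (fun p => p.2 != 1)
          = rest.countP (fun p => p.2 != 1) := by simp [List.countP_cons, hw]
      rw [hc1, hc2]; omega
    · have h' : pvScanBack rest (b + 1) = none := by
        simpa [pvScanBack, hw] using h
      have hih := ih (b + 1) h'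
      have hc1 : ((j, w) :: rest).countP (fun p => p.2 == 1)
          = rest.countP (fun p => p.2 == 1) := by simp [List.countP_cons, hw]
      have hc2 : ((j, w) :: rest).countP (fun p => p.2 != 1)
          = rest.countP (fun p => p.2 != 1) + 1 := by simp [List.countP_cons, hw]
      rw [hc1, hc2]; omega

theorem pvEnum_take {α : Type} (s k : Nat) (l : List α) :
    (pvEnum s l).take k = pvEnum s (l.take k) := by
  induction l generalizing s k with
  | nil => simp [pvEnum]
  | cons x xs ih =>
    cases k with
    | zero => rfl
    | succ k => simp [pvEnum, ih (s + 1) k]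

-- if strictly more pushes than pops precede position k, the scan finds a partner
theorem pvSOS_isSome (ws : List Int) (k : Nat)
    (h : ((ws.take k).countP (fun w => w != 1)) < ((ws.take k).countP (fun w => w == 1))) :
    ∃ j, pvSOS ws k 0 = some j := by
  rcases hs : pvSOS ws k 0 with _ | j
  · exfalso
    have hn := pvScanBack_none_le (((pvEnum 0 ws).take k).reverse) 0 hs
    rw [pvEnum_take, List.countP_reverse, List.countP_reverse, pvEnum_countP_eq, pvEnum_countP_ne] at hn
    omega
  · exact ⟨j, rfl⟩

-- the main step-indexed equivalence: A's stack is the backward scan of the prefix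
theorem pvMain (xs ys ws' : List Int) (p1 : Bool)
    (hpre : Pre_get_model_no xs ys ws' p1) :
    ∀ (u : List (Int × Int × Int)) (k : Nat) (st : List (Nat × Int)) (m : List Int),
      (xs.zip (ys.zip ws')).drop k = u →
      (∀ b, st[b]? = (pvSOS ((xs.zip (ys.zip ws')).map (fun t => t.2.2)) k b).map
          (fun j => (j, ys.getD j 0))) →
      pvGoA p1 (pvEnum k u) st m
        = pvGoB ys ((xs.zip (ys.zip ws')).map (fun t => t.2.2)) p1 (pvEnum k u) m := by
  intro u
  set tz := xs.zip (ys.zip ws') with htz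
  set ws := tz.map (fun t => t.2.2) with hws
  induction u with
  | nil => intro k st m _ _; simp [pvEnum, pvGoA, pvGoB]
  | cons e u ih =>
    intro k st m hdrop hinv
    obtain ⟨a, b, c⟩ := e
    have hk : tz[k]? = some (a, b, c) := by
      have := congrArg (fun l : List (Int × Int × Int) => l[0]?) hdrop
      simpa [List.getElem?_drop] using this
    have hklen : k < tz.length := by
      rcases List.getElem?_eq_some_iff.mp hk with ⟨hlt, _⟩
      exact hlt
    have hwk : ws[k]? = some c := by
      rw [hws, List.getElem?_map, hk]; rfl
    have hb : ys[k]? = some b := by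
      have h1 : (ys.zip ws')[k]? = some (b, c) := by
        have := hk
        rw [htz] at this
        rcases List.getElem?_zip_eq_some.mp this with ⟨_, h2⟩
        exact h2
      rcases List.getElem?_zip_eq_some.mp h1 with ⟨h2, _⟩
      exact h2
    have hbgetD : ys.getD k 0 = b := by
      simp [List.getD, hb]
    have hdrop' : tz.drop (k + 1) = u := by
      have := congrArg (List.drop 1) hdrop
      simpa [List.drop_drop, Nat.add_comm 1 k] using this
    rw [show pvEnum k ((a, b, c) :: u) = (k, (a, b, c)) :: pvEnum (k + 1) u from rfl]
    by_cases hc : c = 1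
    · -- push step
      simp only [pvGoA, pvGoB, hc, beq_self_eq_true, if_true]
      apply ih (k + 1) ((k, b) :: st) m hdrop'
      intro bb
      cases bb with
      | zero =>
        rw [pvSOS_open_zero ws k c hwk hc]
        simp [hb]
      | succ bb =>
        rw [pvSOS_open_succ ws k c hwk hc]
        simpa using hinv bb
    · -- pop step
      have hcb : ((c == 1) : Bool) = false := by simp [hc]
      -- Pre_ at index k gives a strictly positive balance before k
      have hklen' : k < min xs.length (min ys.length ws'.length) := by
        rw [htz, List.length_zip, List.length_zip] at hklen
        omega
      have hwsk : ws'.getD k 0 = c := by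
        have h1 : (ys.zip ws')[k]? = some (b, c) := by
          have := hk
          rw [htz] at this
          exact (List.getElem?_zip_eq_some.mp this).2
        have h2 : ws'[k]? = some c := (List.getElem?_zip_eq_some.mp h1).2
        simp [List.getD, h2]
      have hbal := (hpre k hklen' (by rw [hwsk]; exact hc)).2
      -- transfer the count from ws' to ws (ws is the zipped truncation of ws')
      have hws_take : ws.take k = ws'.take k := by
        apply List.ext_getElem?
        intro i
        rw [List.getElem?_take, List.getElem?_take]
        split
        · rename_i hi
          have hx : i < xs.length := by omega
          have hy : i < ys.length := by omega
          have hwl : i < ws'.length := by omega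
          rw [hws, List.getElem?_map]
          rw [show tz[i]? = some (xs[i], (ys[i], ws'[i])) from ?_]
          · simp [List.getElem?_eq_getElem hwl]
          · rw [htz]
            exact List.getElem?_zip_eq_some.mpr ⟨List.getElem?_eq_getElem hx,
              List.getElem?_zip_eq_some.mpr ⟨List.getElem?_eq_getElem hy, List.getElem?_eq_getElem hwl⟩⟩
        · rfl
      have hbal' : ((ws.take k).countP (fun w => w != 1)) < ((ws.take k).countP (fun w => w == 1)) := by
        rw [hws_take]; exact hbal
      obtain ⟨iv, hiv⟩ := pvSOS_isSome ws k hbal'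
      rcases st with _ | ⟨⟨p, q⟩, st'⟩
      · have h0 := hinv 0
        rw [hiv] at h0
        simp at h0
      · have h0 := hinv 0
        rw [hiv] at h0
        simp at h0
        obtain ⟨hp, hq⟩ := h0
        simp only [pvGoA, pvGoB, hcb]
        rw [show pvScanBack ((pvEnum 0 ws).take k).reverse 0 = pvSOS ws k 0 from rfl, hiv]
        subst hp hq
        apply ih (k + 1) st' _ hdrop'
        intro bb
        rw [pvSOS_close ws k c hwk hc]
        simpa using hinv (bb + 1)

-- ===== VERDICT (by name: the statement is the Claim_ definition above) =====
theorem get_model_no_spec : Claim_equal_get_model_no := by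
  intro xs ys ws' p1 _ hpre
  have h := pvMain xs ys ws' p1 hpre (xs.zip (ys.zip ws')) 0 [] (List.replicate 14 0)
    (by simp) (by intro b; simp [pvSOS, pvScanBack])
  unfold Spec_get_model_no
  simp only [get_model_no, get_model_no_alt]
  rw [h]
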